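-- pv_equiv track=rewrite | github.com/pmastrogiovanni/AdventOfCode23 | day9_OasisReport.py | extrapolation
-- ===== SOURCE A (Python) =====
-- def extrapolation(edgevalues:list,backfill:bool) -> int:
--     history = 0
--     #backwards or forwards extrapolation based on the flag
--     for i in range(1,len(edgevalues)):
--         if backfill:
--             history =  edgevalues[i] - history
--         else:
--             history = edgevalues[i] + history
--     return history
-- ===== SOURCE B (Python) =====
-- def extrapolation(edgevalues: list, backfill: bool) -> int:
--     tail = edgevalues[1:]
--     if not backfill:
--         return sum(tail)
--     return sum(v if k % 2 == 0 else -v for k, v in enumerate(reversed(tail)))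
-- ===== Notes on version B (the rewrite author's own statement) =====
-- stated objective: simpler
-- what changed: Replaced the running-accumulator loop by closed forms: plain sum of the tail for forward extrapolation, and an alternating (parity-signed) sum of the reversed tail for backfill.
import Mathlib
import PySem

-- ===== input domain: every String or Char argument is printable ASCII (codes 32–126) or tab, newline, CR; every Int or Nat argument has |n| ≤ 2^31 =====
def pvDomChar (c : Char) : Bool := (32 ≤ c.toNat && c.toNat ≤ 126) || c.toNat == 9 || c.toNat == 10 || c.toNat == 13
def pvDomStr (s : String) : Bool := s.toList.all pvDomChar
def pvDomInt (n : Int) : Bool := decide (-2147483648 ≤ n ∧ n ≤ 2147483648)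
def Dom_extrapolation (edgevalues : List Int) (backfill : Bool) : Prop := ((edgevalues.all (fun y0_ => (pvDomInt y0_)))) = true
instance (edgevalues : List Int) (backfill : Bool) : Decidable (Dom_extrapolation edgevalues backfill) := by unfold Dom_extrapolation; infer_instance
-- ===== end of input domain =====

-- B replaces A's running-accumulator loop by closed forms (plain sum / parity-signed sum); objective: simpler.
-- ===== PORT A =====
-- literal port: for i in range(1, len(edgevalues)): history = ev[i] -/+ history
-- (ev[i] ported as pyGetD ev i 0; every i produced by the range is in bounds, so the default is never used)
def extrapolation (edgevalues : List Int) (backfill : Bool) : Int :=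
  (PySem.List.pyRange 1 (PySem.List.len edgevalues) 1).foldl
    (fun history i =>
      if backfill then PySem.List.pyGetD edgevalues i 0 - history
      else PySem.List.pyGetD edgevalues i 0 + history) 0

-- ===== PORT B =====
def extrapolation_alt (edgevalues : List Int) (backfill : Bool) : Int :=
  let tail := PySem.List.slice edgevalues (some 1) none
  if !backfill then tail.sum
  else ((PySem.List.enumerate tail.reverse 0).map
          (fun p => if p.1 % 2 = 0 then p.2 else -p.2)).sum

-- ===== PRECONDITION & SPEC =====
def Spec_extrapolation (edgevalues : List Int) (backfill : Bool) (out : Int) : Prop := out = extrapolation_alt edgevalues backfill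
instance (edgevalues : List Int) (backfill : Bool) (out : Int) : Decidable (Spec_extrapolation edgevalues backfill out) := by unfold Spec_extrapolation; infer_instance

-- ===== CLAIM (what is proved, stated in full; the proofs are below) =====
def Claim_equal_extrapolation : Prop := ∀ (edgevalues : List Int) (backfill : Bool), Dom_extrapolation edgevalues backfill → Spec_extrapolation edgevalues backfill (extrapolation edgevalues backfill)

-- ===== LEMMAS AND PROOFS =====

-- foldl with (v + h) is the sum
theorem pv_foldl_add_eq_sum (t : List Int) (h0 : Int) :
    t.foldl (fun h v => v + h) h0 = h0 + t.sum := by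
  induction t generalizing h0 with
  | nil => simp
  | cons x xs ih => simp [List.foldl_cons, ih]; ring

-- shifting the enumeration start by one flips every sign
theorem pv_altsum_shift (r : List Int) (s : Int) :
    ((PySem.List.enumerate r (s + 1)).map (fun p => if p.1 % 2 = 0 then p.2 else -p.2)).sum
      = -((PySem.List.enumerate r s).map (fun p => if p.1 % 2 = 0 then p.2 else -p.2)).sum := by
  induction r generalizing s with
  | nil => simp [PySem.List.enumerate_nil]
  | cons x xs ih =>
    simp only [PySem.List.enumerate_cons, List.map_cons, List.sum_cons, ih]
    have hpar : ((s + 1) % 2 = 0) ↔ ¬ (s % 2 = 0) := by omega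
    by_cases h : s % 2 = 0
    · rw [if_neg (by simpa [hpar] using h), if_pos h]; ring
    · rw [if_pos (hpar.mpr h), if_neg h]; ring

-- foldl with (v - h) is the parity-signed sum of the reversed list
theorem pv_foldl_sub_eq_altsum (t : List Int) :
    t.foldl (fun h v => v - h) 0
      = ((PySem.List.enumerate t.reverse 0).map (fun p => if p.1 % 2 = 0 then p.2 else -p.2)).sum := by
  rw [← List.reverse_reverse t, List.foldl_reverse, List.reverse_reverse]
  induction t.reverse with
  | nil => simp [PySem.List.enumerate_nil]
  | cons x xs ih =>
    simp only [List.foldr_cons, PySem.List.enumerate_cons, List.map_cons, List.sum_cons, ih]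
    rw [show (0 : Int) + 1 = 0 + 1 from rfl, pv_altsum_shift]
    rw [if_pos (by norm_num : (0 : Int) % 2 = 0)]; ring

-- ===== VERDICT (by name: the statement is the Claim_ definition above) =====
theorem extrapolation_spec : Claim_equal_extrapolation := by
  intro ev b _
  unfold Spec_extrapolation extrapolation extrapolation_alt
  rw [PySem.List.foldl_pyRange_pyGetD ev 0
        (fun h v => if b then v - h else v + h) 0 (by norm_num)]
  rw [PySem.List.slice_from_one]
  cases b with
  | false =>
    simp only [Bool.not_false, if_true]
    simpa [List.drop_one] using pv_foldl_add_eq_sum ev.tail 0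
  | true =>
    simp only [Bool.not_true]
    simpa [List.drop_one] using pv_foldl_sub_eq_altsum ev.tail
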